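-- pv_equiv track=rewrite | github.com/Kareem871/schedule-GA | School-Timetable-Scheduling.py | soft2
-- ===== SOURCE A (Python) =====
-- tech_sub = [	#17 teacher
--                 ["a", "math      "],
--                 ["b", "science   "],
--                 ["c", "phylisophy"],
--                 ["d", "history   "],
--                 ["e", "health    "],
--                 ["f", "culture   "],
--                 ["g", "english   "],
--                 ["h", "arabic    "],
--                 ["i", "chemistry "],
--                 ["j", "physics   "],
--                 ["k", "math      "],
--                 ["l", "science   "],
--                 ["m", "health    "],
--                 ["n", "english   "],
--                 ["o", "history   "],
--                 ["p", "culture   "],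
--                 ["q", "arabic    "]
--     ]
--
-- def soft2(tech_count):
--     penalty=0
--     tmparr=[]
--     for teacher in range(len(tech_sub)):
--         sub=tech_sub[teacher][1]
--         tmp=-1
--         if tech_sub[teacher][1] in tmparr:
--                 continue
--         for techcount in range(len(tech_count)):
--             if sub == tech_count[techcount][0][1]:
--                 if tmp == -1:
--                     tmp=tech_count[techcount][1]
--                 elif tmp != tech_count[techcount][1]:
--                         penalty+=1
--                         break
--         tmparr.append(tech_sub[teacher][1])
--     return penalty
-- ===== SOURCE B (Python) =====
-- tech_sub = [	#17 teacher
--                 ["a", "math      "],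
--                 ["b", "science   "],
--                 ["c", "phylisophy"],
--                 ["d", "history   "],
--                 ["e", "health    "],
--                 ["f", "culture   "],
--                 ["g", "english   "],
--                 ["h", "arabic    "],
--                 ["i", "chemistry "],
--                 ["j", "physics   "],
--                 ["k", "math      "],
--                 ["l", "science   "],
--                 ["m", "health    "],
--                 ["n", "english   "],
--                 ["o", "history   "],
--                 ["p", "culture   "],
--                 ["q", "arabic    "]
--     ]
--
-- def soft2(tech_count):
--     # one indexed pass over tech_count instead of a rescan per subject
--     subs = {row[1] for row in tech_sub}
--     first = {}
--     conflicts = set()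
--     for entry in tech_count:
--         sub = entry[0][1]
--         if sub not in subs:
--             continue
--         if first.get(sub, -1) == -1:
--             first[sub] = entry[1]
--         elif first[sub] != entry[1]:
--             conflicts.add(sub)
--     return len(conflicts)
-- ===== Notes on version B (the rewrite author's own statement) =====
-- stated objective: idiomatic
-- what changed: A rescans all of tech_count once per distinct subject of tech_sub; B makes a single pass over tech_count, keeping a dict of each subject's first assigned value (with A's -1 'unset' sentinel semantics) and a set of conflicting subjects, and returns the size of that set.
import Mathlib
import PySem

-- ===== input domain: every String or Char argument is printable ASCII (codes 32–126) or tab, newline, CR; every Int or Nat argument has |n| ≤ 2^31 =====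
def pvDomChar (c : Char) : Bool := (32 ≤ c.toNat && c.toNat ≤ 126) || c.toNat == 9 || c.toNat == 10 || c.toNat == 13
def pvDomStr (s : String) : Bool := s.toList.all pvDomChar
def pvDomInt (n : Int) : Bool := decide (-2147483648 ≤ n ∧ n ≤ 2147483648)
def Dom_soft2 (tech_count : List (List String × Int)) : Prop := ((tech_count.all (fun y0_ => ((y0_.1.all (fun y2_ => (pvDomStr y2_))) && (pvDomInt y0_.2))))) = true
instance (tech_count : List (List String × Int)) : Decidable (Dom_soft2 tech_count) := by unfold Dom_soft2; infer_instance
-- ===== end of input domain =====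

-- B replaces A's per-subject rescan of tech_count by one indexed pass (dict of first
-- values + conflict set); equivalence of the RETURN value on Pre_soft2.

-- ===== PORT A =====
-- the module-level constant tech_sub
def techSub : List (List String) :=
  [["a", "math      "], ["b", "science   "], ["c", "phylisophy"], ["d", "history   "],
   ["e", "health    "], ["f", "culture   "], ["g", "english   "], ["h", "arabic    "],
   ["i", "chemistry "], ["j", "physics   "], ["k", "math      "], ["l", "science   "],
   ["m", "health    "], ["n", "english   "], ["o", "history   "], ["p", "culture   "],
   ["q", "arabic    "]]

-- A's inner loop over tech_count with state tmp; returns whether 'penalty += 1; break' fires.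
-- tech_count[i][0][1] is ported as pyGet?·getD: Pre_soft2 excludes the IndexError inputs.
def soft2Inner (sub : String) (tmp : Int) : List (List String × Int) → Bool
  | [] => false
  | (k, v) :: rest =>
    if sub == (PySem.List.pyGet? k 1).getD "" then
      if tmp == -1 then soft2Inner sub v rest
      else if !(tmp == v) then true
      else soft2Inner sub tmp rest
    else soft2Inner sub tmp rest

def soft2 (tech_count : List (List String × Int)) : Int :=
  (techSub.foldl
    (fun (st : Int × List String) row =>
      let sub := (PySem.List.pyGet? row 1).getD ""
      if st.2.contains sub then st
      else (st.1 + (if soft2Inner sub (-1) tech_count then 1 else 0), st.2 ++ [sub]))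
    (0, [])).1

-- ===== PORT B =====
def soft2_alt (tech_count : List (List String × Int)) : Int :=
  let subs : PySem.Set String := PySem.Set.ofList (techSub.map (fun row => (PySem.List.pyGet? row 1).getD ""))
  let st := tech_count.foldl
    (fun (st : PySem.Dict String Int × PySem.Set String) entry =>
      let sub := (PySem.List.pyGet? entry.1 1).getD ""
      if subs.contains sub then
        if st.1.getD sub (-1) == -1 then (st.1.insert sub entry.2, st.2)
        else if !(st.1.getD sub (-1) == entry.2) then (st.1, PySem.Set.add st.2 sub)
        else st
      else st)
    (PySem.Dict.empty, PySem.Set.empty)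
  PySem.Set.len st.2

-- ===== PRECONDITION & SPEC =====
-- Pre_ excludes exactly the inputs on which Python A raises IndexError: an entry whose
-- first component has fewer than two strings (tech_count[i][0][1] out of range).
def Pre_soft2 (tech_count : List (List String × Int)) : Prop :=
  ∀ p ∈ tech_count, 2 ≤ p.1.length

instance (tech_count : List (List String × Int)) : Decidable (Pre_soft2 tech_count) := by
  unfold Pre_soft2; infer_instance

def pvWitness_soft2 : (List (List String × Int)) :=
  [(["a", "math      "], 3), (["b", "math      "], 4), (["c", "art"], 3)]

def Spec_soft2 (tech_count : List (List String × Int)) (out : Int) : Prop := out = soft2_alt tech_count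
instance (tech_count : List (List String × Int)) (out : Int) : Decidable (Spec_soft2 tech_count out) := by unfold Spec_soft2; infer_instance

-- ===== CLAIM (what is proved, stated in full; the proofs are below) =====
def Claim_equal_soft2 : Prop := ∀ (tech_count : List (List String × Int)), Dom_soft2 tech_count → Pre_soft2 tech_count → Spec_soft2 tech_count (soft2 tech_count)

-- ===== LEMMAS AND PROOFS =====

-- abbreviations for the proofs
def subOf (k : List String) : String := (PySem.List.pyGet? k 1).getD ""

def subsL : PySem.Set String := PySem.Set.ofList (techSub.map (fun row => subOf row))

-- ---- A side ----

-- what A's outer fold adds to the penalty: over subjects of rows not yet in arr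
-- (first occurrences), count those whose inner scan fires
def countNew (tc : List (List String × Int)) : List (List String) → List String → Int
  | [], _ => 0
  | row :: rest, arr =>
    if arr.contains (subOf row) then countNew tc rest arr
    else (if soft2Inner (subOf row) (-1) tc then 1 else 0) + countNew tc rest (arr ++ [subOf row])

theorem foldA_eq_countNew (tc : List (List String × Int)) :
    ∀ (rows : List (List String)) (pen : Int) (arr : List String),
      (rows.foldl
        (fun (st : Int × List String) row =>
          let sub := (PySem.List.pyGet? row 1).getD ""
          if st.2.contains sub then st
          else (st.1 + (if soft2Inner sub (-1) tc then 1 else 0), st.2 ++ [sub]))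
        (pen, arr)).1 = pen + countNew tc rows arr := by
  intro rows
  induction rows with
  | nil => intro pen arr; simp [countNew]
  | cons row rest ih =>
    intro pen arr
    rw [List.foldl_cons]
    dsimp only
    rw [show (PySem.List.pyGet? row 1).getD "" = subOf row from rfl]
    simp only [countNew]
    by_cases h : arr.contains (subOf row) = true
    · rw [if_pos h, if_pos h, ih]
    · rw [if_neg h, if_neg h, ih]
      ring

theorem countNew_eq_filter (tc : List (List String × Int)) :
    ∀ (rows : List (List String)) (arr : PySem.Set String), arr.Nodup →
      countNew tc rows arr =
        (((PySem.Set.update arr (rows.map subOf)).filter (fun s => soft2Inner s (-1) tc)).length : Int)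
        - ((arr.filter (fun s => soft2Inner s (-1) tc)).length : Int) := by
  intro rows
  induction rows with
  | nil => intro arr _; simp [countNew, PySem.Set.update]
  | cons row rest ih =>
    intro arr hnd
    by_cases h : subOf row ∈ arr
    · have hc : List.contains arr (subOf row) = true := by simpa using h
      rw [countNew, if_pos hc, ih arr hnd, List.map_cons, PySem.Set.update_cons,
        PySem.Set.add_of_mem h]
    · have hc : List.contains arr (subOf row) = false := by simpa using h
      rw [countNew, if_neg (by simpa using h), List.map_cons, PySem.Set.update_cons,
        PySem.Set.add_of_not_mem h,
        ih (arr ++ [subOf row])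
          (hnd.append (List.nodup_singleton _) (List.disjoint_singleton.2 h)),
        List.filter_append]
      by_cases hp : soft2Inner (subOf row) (-1) tc = true
      · simp [hp]
        try ring
      · simp [hp]
        try ring

theorem soft2_eq_filter (tc : List (List String × Int)) :
    soft2 tc = ((subsL.filter (fun s => soft2Inner s (-1) tc)).length : Int) := by
  rw [soft2, foldA_eq_countNew, countNew_eq_filter tc techSub [] (by simp)]
  rw [PySem.Set.update_nil_left]
  simp [subsL]

-- ---- B side ----

-- invariant of B's single pass: membership in the conflict set

-- how A's inner scan steps on a cons whose subject is / is not the scanned one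
theorem inner_cons_ne (s : String) (tmp : Int) (k : List String) (v : Int)
    (rest : List (List String × Int)) (hs : s ≠ subOf k) :
    soft2Inner s tmp ((k, v) :: rest) = soft2Inner s tmp rest := by
  simp only [soft2Inner]
  rw [if_neg (by simpa [subOf] using hs)]

theorem inner_cons_eq (tmp : Int) (k : List String) (v : Int)
    (rest : List (List String × Int)) :
    soft2Inner (subOf k) tmp ((k, v) :: rest) =
      if tmp == -1 then soft2Inner (subOf k) v rest
      else if !(tmp == v) then true
      else soft2Inner (subOf k) tmp rest := by
  simp only [soft2Inner]
  rw [if_pos (by simp [subOf])]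

theorem foldB_mem :
    ∀ (l : List (List String × Int)) (d : PySem.Dict String Int) (c : PySem.Set String) (s : String),
      (s ∈ (l.foldl
        (fun (st : PySem.Dict String Int × PySem.Set String) entry =>
          let sub := (PySem.List.pyGet? entry.1 1).getD ""
          if subsL.contains sub then
            if st.1.getD sub (-1) == -1 then (st.1.insert sub entry.2, st.2)
            else if !(st.1.getD sub (-1) == entry.2) then (st.1, PySem.Set.add st.2 sub)
            else st
          else st)
        (d, c)).2)
      ↔ (s ∈ c ∨ (s ∈ subsL ∧ soft2Inner s (d.getD s (-1)) l = true)) := by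
  intro l
  induction l with
  | nil => intro d c s; simp [soft2Inner]
  | cons entry rest ih =>
    intro d c s
    obtain ⟨k, v⟩ := entry
    rw [List.foldl_cons]
    dsimp only
    rw [show (PySem.List.pyGet? k 1).getD "" = subOf k from rfl]
    by_cases hmem : subOf k ∈ subsL
    · have hc : subsL.contains (subOf k) = true := by
        simpa [PySem.Set.contains_iff] using hmem
      rw [if_pos hc]
      by_cases h1 : d.getD (subOf k) (-1) = -1
      · rw [if_pos (by simp [h1]), ih]
        by_cases hs : s = subOf k
        · subst hs
          rw [inner_cons_eq, if_pos (by simp [h1]), PySem.Dict.getD_insert_self]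
        · rw [PySem.Dict.getD_insert_of_ne d v (-1) hs, inner_cons_ne s _ k v rest hs]
      · by_cases h2 : d.getD (subOf k) (-1) = v
        · rw [if_neg (by simp [h1]), if_neg (by simp [h2]), ih]
          by_cases hs : s = subOf k
          · subst hs
            rw [inner_cons_eq, if_neg (by simp [h1]), if_neg (by simp [h2]), h2]
          · rw [inner_cons_ne s _ k v rest hs]
        · rw [if_neg (by simp [h1]), if_pos (by simp [h2]), ih]
          by_cases hs : s = subOf k
          · subst hs
            rw [inner_cons_eq, if_neg (by simp [h1]), if_pos (by simp [h2])]
            simp [PySem.Set.mem_add, hmem]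
          · rw [inner_cons_ne s _ k v rest hs, PySem.Set.mem_add]
            constructor
            · rintro ((h | h) | h)
              · exact Or.inl h
              · exact absurd h hs
              · exact Or.inr h
            · rintro (h | h)
              · exact Or.inl (Or.inl h)
              · exact Or.inr h
    · rw [if_neg (by simpa using hmem), ih]
      by_cases hsub : s ∈ subsL
      · have hs : s ≠ subOf k := fun e => hmem (e ▸ hsub)
        rw [inner_cons_ne s _ k v rest hs]
      · constructor
        · rintro (h | ⟨ha, hb⟩)
          · exact Or.inl h
          · exact absurd ha hsub
        · rintro (h | ⟨ha, hb⟩)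
          · exact Or.inl h
          · exact absurd ha hsub

-- the conflict set stays duplicate-free through the fold
theorem foldB_nodup :
    ∀ (l : List (List String × Int)) (d : PySem.Dict String Int) (c : PySem.Set String), c.Nodup →
      ((l.foldl
        (fun (st : PySem.Dict String Int × PySem.Set String) entry =>
          let sub := (PySem.List.pyGet? entry.1 1).getD ""
          if subsL.contains sub then
            if st.1.getD sub (-1) == -1 then (st.1.insert sub entry.2, st.2)
            else if !(st.1.getD sub (-1) == entry.2) then (st.1, PySem.Set.add st.2 sub)
            else st
          else st)
        (d, c)).2).Nodup := by
  intro l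
  induction l with
  | nil => intro d c h; simpa using h
  | cons entry rest ih =>
    intro d c h
    rw [List.foldl_cons]
    dsimp only
    split_ifs <;> first
      | exact ih _ _ h
      | exact ih _ _ (PySem.Set.nodup_add _ _ h)

theorem soft2_alt_eq_filter (tc : List (List String × Int)) :
    soft2_alt tc = ((subsL.filter (fun s => soft2Inner s (-1) tc)).length : Int) := by
  rw [soft2_alt]
  dsimp only
  rw [show PySem.Set.ofList (techSub.map (fun row => (PySem.List.pyGet? row 1).getD "")) = subsL from rfl]
  have hmemC := foldB_mem tc PySem.Dict.empty PySem.Set.empty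
  have hndC := foldB_nodup tc PySem.Dict.empty PySem.Set.empty (by simp [PySem.Set.empty])
  have hperm : ((tc.foldl
        (fun (st : PySem.Dict String Int × PySem.Set String) entry =>
          let sub := (PySem.List.pyGet? entry.1 1).getD ""
          if subsL.contains sub then
            if st.1.getD sub (-1) == -1 then (st.1.insert sub entry.2, st.2)
            else if !(st.1.getD sub (-1) == entry.2) then (st.1, PySem.Set.add st.2 sub)
            else st
          else st)
        (PySem.Dict.empty, PySem.Set.empty)).2).Perm
      (subsL.filter (fun s => soft2Inner s (-1) tc)) := by
    rw [List.perm_ext_iff_of_nodup hndC (List.Nodup.filter _ (by simp [subsL, PySem.Set.nodup_ofList]))]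
    intro s
    rw [hmemC s, List.mem_filter]
    simp [PySem.Set.empty, PySem.Dict.getD_empty]
  rw [PySem.Set.len, hperm.length_eq]

-- ===== VERDICT (by name: the statement is the Claim_ definition above) =====
theorem soft2_spec : Claim_equal_soft2 := by
  intro tc _ _
  show soft2 tc = soft2_alt tc
  rw [soft2_eq_filter, soft2_alt_eq_filter]
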